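-- pv_equiv track=rewrite | github.com/pypi-data/pypi-mirror-380 | packages/mempack/mempack-0.1.0.tar.gz/mempack-0.1.0/mempack/utils/text.py | find_sentence_split
-- ===== SOURCE A (Python) =====
-- from typing import List, Optional, Tuple
--
-- def find_sentence_split(
--     text: str,
--     sentence_endings: List[str],
--     min_split: int = 50,
-- ) -> int:
--     """Find the best sentence split point in text.
--
--     Args:
--         text: Text to analyze
--         sentence_endings: Characters that indicate sentence endings
--         min_split: Minimum split position
--
--     Returns:
--         Best split position (0 if no good split found)
--     """
--     if len(text) < min_split:
--         return 0
--
--     # Look for sentence endings from the end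
--     for i in range(len(text) - 1, min_split - 1, -1):
--         if text[i] in sentence_endings:
--             # Check if next character is whitespace or end of text
--             if i + 1 >= len(text) or text[i + 1].isspace():
--                 return i + 1
--
--     return 0
-- ===== SOURCE B (Python) =====
-- def find_sentence_split(text, sentence_endings, min_split=50):
--     n = len(text)
--     if n < min_split:
--         return 0
--     lo = max(min_split, 0)
--     best = 0
--     for ch in sentence_endings:
--         if len(ch) != 1:
--             continue  # a multi-character (or empty) ending can never equal a single character
--         hi = n
--         while True:
--             j = text.rfind(ch, lo, hi)
--             if j == -1:
--                 break
--             if j + 1 == n or text[j + 1].isspace():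
--                 if j + 1 > best:
--                     best = j + 1
--                 break
--             hi = j
--     return best
-- ===== Notes on version B (the rewrite author's own statement) =====
-- stated objective: alternative
-- what changed: Instead of scanning positions one by one, B iterates over the ending characters and for each one jumps between its occurrences with str.rfind from the right, keeping the best qualifying position over all endings.
-- outside the precondition, e.g. on find_sentence_split('Hi. x', ['.'], -100): A returns 3, B returns 3; on find_sentence_split('abc', ['.'], -100): A raises IndexError, B returns 0
import Mathlib
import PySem

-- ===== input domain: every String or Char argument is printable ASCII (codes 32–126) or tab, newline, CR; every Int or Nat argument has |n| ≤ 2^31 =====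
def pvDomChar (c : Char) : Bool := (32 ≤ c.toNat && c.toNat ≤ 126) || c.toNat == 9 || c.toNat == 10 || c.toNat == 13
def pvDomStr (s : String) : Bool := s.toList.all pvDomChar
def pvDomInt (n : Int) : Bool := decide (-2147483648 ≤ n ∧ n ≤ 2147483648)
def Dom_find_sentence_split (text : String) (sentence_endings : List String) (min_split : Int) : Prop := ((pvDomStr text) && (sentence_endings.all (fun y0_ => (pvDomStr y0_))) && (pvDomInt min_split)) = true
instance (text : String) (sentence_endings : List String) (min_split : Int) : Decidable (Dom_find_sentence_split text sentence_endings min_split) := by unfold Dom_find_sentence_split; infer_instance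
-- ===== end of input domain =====

-- B replaces A's position-by-position backward scan by a per-ending-character search that
-- jumps between occurrences with str.rfind and takes the best position over all endings
-- (objective: alternative algorithm, same worst-case cost).

-- ===== PORT A =====
-- the per-index condition A tests at (Int) index i: text[i] in sentence_endings
-- and (i+1 >= len(text) or text[i+1].isspace()); pyGet? is in range whenever Pre_ holds,
-- the .getD ' ' default is never reached there
def pvCond (cs : List Char) (es : List (List Char)) (i : Int) : Bool :=
  es.contains [(PySem.List.pyGet? cs i).getD ' ']
    && (decide ((cs.length : Int) ≤ i + 1) || PySem.Chars.isspace ((PySem.List.pyGet? cs (i + 1)).getD ' '))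

-- A's backward for-loop with early return
def pvScanA (cs : List Char) (es : List (List Char)) : List Int → Int
  | [] => 0
  | i :: rest => if pvCond cs es i then i + 1 else pvScanA cs es rest

def find_sentence_split (text : String) (sentence_endings : List String) (min_split : Int) : Int :=
  let cs := text.toList
  let es := sentence_endings.map String.toList
  if (cs.length : Int) < min_split then 0
  else pvScanA cs es (PySem.List.pyRange ((cs.length : Int) - 1) (min_split - 1) (-1))

-- ===== PORT B =====
-- B's test on the character after position j: j + 1 == n or text[j+1].isspace()
-- (the getD default is only read when j + 1 == n, where the first disjunct already decides)
def pvNextOk (cs : List Char) (j : Nat) : Bool :=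
  (j + 1 == cs.length) || PySem.Chars.isspace (cs.getD (j + 1) ' ')

-- hand port of text.rfind(ch, lo, hi) for a single-character needle ch with 0 <= lo and
-- hi <= len(text): the largest index j in [lo, hi) with text[j] == ch, or -1 (exact there)
def pvRfindChar (cs : List Char) (ch : Char) (lo : Nat) : Nat → Int
  | 0 => -1
  | h + 1 => if lo ≤ h ∧ cs.getD h ' ' = ch then (h : Int) else pvRfindChar cs ch lo h

-- needed by pvPerEnding's termination: a non-(-1) result of rfind is below hi
theorem pvRfindChar_lt (cs : List Char) (ch : Char) (lo : Nat) :
    ∀ hi : Nat, pvRfindChar cs ch lo hi ≠ -1 → (pvRfindChar cs ch lo hi).toNat < hi := by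
  intro hi
  induction hi with
  | zero => intro h; exact absurd rfl h
  | succ h ih =>
    intro hne
    rw [pvRfindChar] at hne ⊢
    by_cases hc : lo ≤ h ∧ cs.getD h ' ' = ch
    · rw [if_pos hc]; omega
    · rw [if_neg hc] at hne ⊢
      exact Nat.lt_succ_of_lt (ih hne)

-- B's inner while-loop for one ending character: j = text.rfind(ch, lo, hi); stop at -1 or
-- at a qualifying j, else continue with hi = j
def pvPerEnding (cs : List Char) (ch : Char) (lo : Nat) (hi : Nat) : Int :=
  if hj : pvRfindChar cs ch lo hi = -1 then 0
  else if pvNextOk cs (pvRfindChar cs ch lo hi).toNat then pvRfindChar cs ch lo hi + 1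
  else pvPerEnding cs ch lo (pvRfindChar cs ch lo hi).toNat
termination_by hi
decreasing_by exact pvRfindChar_lt cs ch lo hi hj

def find_sentence_split_alt (text : String) (sentence_endings : List String) (min_split : Int) : Int :=
  let cs := text.toList
  let n := cs.length
  if (n : Int) < min_split then 0
  else
    let lo := (max min_split 0).toNat
    sentence_endings.foldl
      (fun best s =>
        match s.toList with
        | [ch] =>
          let r := pvPerEnding cs ch lo n
          if r > best then r else best
        | _ => best)  -- len(ch) != 1: skipped, a multi-char (or empty) ending never equals one character
      0

-- ===== PRECONDITION & SPEC =====
-- Pre_ excludes min_split < -len(text): there A's backward scan runs past index -len and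
-- raises IndexError unless some earlier index qualifies (B agrees with A whenever A still
-- returns there, and returns 0 where A raises).
def Pre_find_sentence_split (text : String) (sentence_endings : List String) (min_split : Int) : Prop :=
  -(text.toList.length : Int) ≤ min_split
instance (text : String) (sentence_endings : List String) (min_split : Int) : Decidable (Pre_find_sentence_split text sentence_endings min_split) := by unfold Pre_find_sentence_split; infer_instance

def pvWitness_find_sentence_split : String × List String × Int := ("Hi there. Bye", [".", "!"], 3)

def Spec_find_sentence_split (text : String) (sentence_endings : List String) (min_split : Int) (out : Int) : Prop := out = find_sentence_split_alt text sentence_endings min_split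
instance (text : String) (sentence_endings : List String) (min_split : Int) (out : Int) : Decidable (Spec_find_sentence_split text sentence_endings min_split out) := by unfold Spec_find_sentence_split; infer_instance

-- ===== CLAIM (what is proved, stated in full; the proofs are below) =====
def Claim_equal_find_sentence_split : Prop := ∀ (text : String) (sentence_endings : List String) (min_split : Int), Dom_find_sentence_split text sentence_endings min_split → Pre_find_sentence_split text sentence_endings min_split → Spec_find_sentence_split text sentence_endings min_split (find_sentence_split text sentence_endings min_split)

-- ===== LEMMAS AND PROOFS =====

-- the descending index list [hi-1, hi-2, ..., lo] both sides are measured against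
def pvDescR (lo : Nat) : Nat → List Nat
  | 0 => []
  | h + 1 => if lo ≤ h then h :: pvDescR lo h else []

def pvOut : Option Nat → Int
  | some j => (j : Int) + 1
  | none => 0

-- "some single-character ending of L equals c"
def pvAnyEnd (L : List String) (c : Char) : Bool :=
  L.any (fun s => match s.toList with | [ch] => ch == c | _ => false)

-- the Nat-indexed qualifying condition shared by both characterizations
def pvQ (cs : List Char) (L : List String) (j : Nat) : Bool :=
  pvAnyEnd L (cs.getD j ' ') && pvNextOk cs j

theorem pvDescR_eq_nil (lo : Nat) : ∀ hi : Nat, hi ≤ lo → pvDescR lo hi = [] := by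
  intro hi
  induction hi with
  | zero => intro _; rfl
  | succ h _ => intro hle; rw [pvDescR, if_neg (by omega)]

theorem pvMem_descR (lo : Nat) : ∀ hi j : Nat, j ∈ pvDescR lo hi ↔ lo ≤ j ∧ j < hi := by
  intro hi
  induction hi with
  | zero => intro j; simp [pvDescR]
  | succ h ih =>
    intro j
    rw [pvDescR]
    by_cases hlo : lo ≤ h
    · rw [if_pos hlo]; simp [ih]; omega
    · rw [if_neg hlo]; simp; omega

theorem pvPairwise_descR (lo : Nat) : ∀ hi : Nat, (pvDescR lo hi).Pairwise (· > ·) := by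
  intro hi
  induction hi with
  | zero => exact List.Pairwise.nil
  | succ h ih =>
    rw [pvDescR]
    split
    · exact List.Pairwise.cons (fun x hx => ((pvMem_descR lo h x).1 hx).2) ih
    · exact List.Pairwise.nil

theorem pvFind?_congr {α : Type} (p q : α → Bool) :
    ∀ l : List α, (∀ x ∈ l, p x = q x) → l.find? p = l.find? q := by
  intro l
  induction l with
  | nil => intro _; rfl
  | cons a t ih =>
    intro h
    have ha := h a (by simp)
    simp only [List.find?]
    rw [ha, ih (fun x hx => h x (by simp [hx]))]

-- rfind is the first match of the descending list
theorem pvRfindChar_eq_find? (cs : List Char) (ch : Char) (lo : Nat) :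
    ∀ hi : Nat, pvRfindChar cs ch lo hi =
      (match (pvDescR lo hi).find? (fun j => cs.getD j ' ' == ch) with
       | some j => (j : Int) | none => -1) := by
  intro hi
  induction hi with
  | zero => rfl
  | succ h ih =>
    rw [pvRfindChar, pvDescR]
    by_cases hlo : lo ≤ h
    · rw [if_pos hlo]
      by_cases hch : cs.getD h ' ' = ch
      · rw [if_pos ⟨hlo, hch⟩,
          List.find?_cons_of_pos (by simp only [beq_iff_eq]; exact hch)]
      · rw [if_neg (by tauto),
          List.find?_cons_of_neg (by simp only [beq_iff_eq]; exact hch), ih]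
    · rw [if_neg (by tauto), if_neg hlo, ih, pvDescR_eq_nil lo h (by omega)]

-- the inner while-loop returns (largest qualifying index for ch) + 1, else 0
theorem pvPerEnding_eq_find? (cs : List Char) (ch : Char) (lo : Nat) :
    ∀ hi : Nat, pvPerEnding cs ch lo hi =
      pvOut ((pvDescR lo hi).find? (fun j => (cs.getD j ' ' == ch) && pvNextOk cs j)) := by
  intro hi
  induction hi with
  | zero => rw [pvPerEnding]; rfl
  | succ h ih =>
    rw [pvDescR]
    by_cases hlo : lo ≤ h
    · rw [if_pos hlo]
      by_cases hch : cs.getD h ' ' = ch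
      · have hrf : pvRfindChar cs ch lo (h + 1) = (h : Int) := by
          rw [pvRfindChar, if_pos ⟨hlo, hch⟩]
        rw [pvPerEnding, hrf]
        rw [dif_neg (by omega)]
        rw [Int.toNat_natCast]
        by_cases hnx : pvNextOk cs h = true
        · rw [if_pos hnx, List.find?_cons_of_pos
            (by simp only [beq_iff_eq, Bool.and_eq_true]; exact ⟨hch, hnx⟩)]
          rfl
        · rw [if_neg hnx, List.find?_cons_of_neg
            (by simp only [beq_iff_eq, Bool.and_eq_true, not_and]; intro _ h2; exact hnx h2), ih]
      · have hrf : pvRfindChar cs ch lo (h + 1) = pvRfindChar cs ch lo h := by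
          rw [pvRfindChar, if_neg (by tauto)]
        have step : pvPerEnding cs ch lo (h + 1) = pvPerEnding cs ch lo h := by
          conv_lhs => rw [pvPerEnding]
          conv_rhs => rw [pvPerEnding]
          rw [hrf]
        rw [step, List.find?_cons_of_neg
          (by simp only [beq_iff_eq, Bool.and_eq_true, not_and]; intro h1; exact absurd h1 hch), ih]
    · rw [if_neg hlo]
      have hrf : pvRfindChar cs ch lo (h + 1) = -1 := by
        rw [pvRfindChar_eq_find?, pvDescR_eq_nil lo (h + 1) (by omega)]
        rfl
      rw [pvPerEnding, dif_pos hrf]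
      rfl

theorem pvOut_nonneg (o : Option Nat) : 0 ≤ pvOut o := by
  cases o <;> simp [pvOut]
  omega

theorem pvOut_le (a : Nat) (p : Nat → Bool) (l : List Nat) (h : ∀ x ∈ l, x < a) :
    pvOut (l.find? p) ≤ (a : Int) + 1 := by
  cases hf : l.find? p with
  | none => simp [pvOut]; omega
  | some x =>
    have := h x (List.mem_of_find?_eq_some hf)
    simp [pvOut]; omega

-- first matches of a strictly descending list merge under max into the disjunction's first match
theorem pvOut_max_or (p q : Nat → Bool) :
    ∀ l : List Nat, l.Pairwise (· > ·) →
      max (pvOut (l.find? p)) (pvOut (l.find? q)) =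
        pvOut (l.find? (fun j => p j || q j)) := by
  intro l
  induction l with
  | nil => intro _; rfl
  | cons a t ih =>
    intro hp
    have hlt : ∀ x ∈ t, x < a := fun x hx => List.rel_of_pairwise_cons hp hx
    by_cases hpa : p a = true <;> by_cases hqa : q a = true
    · rw [List.find?_cons_of_pos hpa, List.find?_cons_of_pos hqa,
        List.find?_cons_of_pos (by simp [hpa])]
      simp
    · rw [List.find?_cons_of_pos hpa, List.find?_cons_of_neg hqa,
        List.find?_cons_of_pos (by simp [hpa])]
      exact max_eq_left (pvOut_le a q t hlt)
    · rw [List.find?_cons_of_neg hpa, List.find?_cons_of_pos hqa,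
        List.find?_cons_of_pos (by simp [hqa])]
      exact max_eq_right (pvOut_le a p t hlt)
    · rw [List.find?_cons_of_neg hpa, List.find?_cons_of_neg hqa,
        List.find?_cons_of_neg (by simp [hpa, hqa]), ih hp.of_cons]

-- B's fold over the endings, with a generalized accumulator
theorem pvFoldl_endings (cs : List Char) (lo : Nat) (n : Nat) :
    ∀ (L : List String) (b : Int), 0 ≤ b →
      L.foldl
        (fun best s =>
          match s.toList with
          | [ch] => let r := pvPerEnding cs ch lo n; if r > best then r else best
          | _ => best) b
      = max b (pvOut ((pvDescR lo n).find? (pvQ cs L))) := by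
  intro L
  induction L with
  | nil =>
    intro b hb
    have hnone : (pvDescR lo n).find? (pvQ cs []) = none := by
      rw [List.find?_eq_none]; intro x _; simp [pvQ, pvAnyEnd]
    rw [hnone]
    simp only [List.foldl_nil, pvOut]
    exact (max_eq_left hb).symm
  | cons s L ih =>
    intro b hb
    have hsplit : ∀ j ∈ pvDescR lo n,
        pvQ cs (s :: L) j =
        (((match s.toList with | [ch] => (cs.getD j ' ' == ch) | _ => false) && pvNextOk cs j)
          || pvQ cs L j) := by
      intro j _
      simp only [pvQ, pvAnyEnd, List.any_cons]
      have hm : (match s.toList with | [ch] => ch == cs.getD j ' ' | _ => false)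
          = (match s.toList with | [ch] => cs.getD j ' ' == ch | _ => false) := by
        cases hs : s.toList with
        | nil => rfl
        | cons c t =>
          cases t with
          | nil => simp [BEq.comm]
          | cons c' t' => rfl
      rw [hm]
      cases (match s.toList with | [ch] => cs.getD j ' ' == ch | _ => false) <;>
        cases pvAnyEnd L (cs.getD j ' ') <;> simp
    rw [List.foldl_cons, pvFind?_congr _ _ _ hsplit,
      ← pvOut_max_or _ _ _ (pvPairwise_descR lo n)]
    cases hs : s.toList with
    | nil =>
      have hnone : (pvDescR lo n).find? (fun x => false && pvNextOk cs x) = none := by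
        rw [List.find?_eq_none]; intro x _; simp
      rw [ih b hb, hnone]
      rw [show pvOut none = 0 from rfl, max_eq_right (pvOut_nonneg _)]
    | cons c t =>
      cases t with
      | nil =>
        simp only [hs]
        have hr := pvPerEnding_eq_find? cs c lo n
        have hnn := pvOut_nonneg ((pvDescR lo n).find? (fun j => (cs.getD j ' ' == c) && pvNextOk cs j))
        rw [ih _ (by rw [hr]; split <;> omega), hr]
        have hmax : (if pvOut ((pvDescR lo n).find? (fun j => (cs.getD j ' ' == c) && pvNextOk cs j)) > b
            then pvOut ((pvDescR lo n).find? (fun j => (cs.getD j ' ' == c) && pvNextOk cs j)) else b)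
            = max b (pvOut ((pvDescR lo n).find? (fun j => (cs.getD j ' ' == c) && pvNextOk cs j))) := by
          split <;> omega
        rw [hmax, max_assoc]
      | cons c' t' =>
        have hnone : (pvDescR lo n).find? (fun x => false && pvNextOk cs x) = none := by
          rw [List.find?_eq_none]; intro x _; simp
        rw [ih b hb, hnone]
        rw [show pvOut none = 0 from rfl, max_eq_right (pvOut_nonneg _)]

-- the descending Nat list is the reverse of the ascending Int range
theorem pvDescR_map_cast (lo : Nat) :
    ∀ hi : Nat, (pvDescR lo hi).map (fun (j : Nat) => (j : Int)) =
      (PySem.List.pyRange (lo : Int) (hi : Int) 1).reverse := by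
  intro hi
  induction hi with
  | zero => rw [PySem.List.pyRange_one_eq_nil (by omega)]; rfl
  | succ h ih =>
    rw [pvDescR]
    by_cases hlo : lo ≤ h
    · rw [if_pos hlo]
      have hc : ((h + 1 : Nat) : Int) = (h : Int) + 1 := by push_cast; ring
      rw [hc, PySem.List.pyRange_one_succ_right (by omega), List.reverse_append,
        List.map_cons, ih]
      rfl
    · rw [if_neg hlo, PySem.List.pyRange_one_eq_nil (by omega)]; rfl

-- A's early-return scan is the first match of its list
theorem pvScanA_eq_find? (cs : List Char) (es : List (List Char)) (l : List Int) :
    pvScanA cs es l = match l.find? (pvCond cs es) with | some j => j + 1 | none => 0 := by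
  induction l with
  | nil => rfl
  | cons i rest ih =>
    by_cases h : pvCond cs es i = true
    · rw [List.find?_cons_of_pos h]; simp [pvScanA, h]
    · rw [List.find?_cons_of_neg h]
      simp only [Bool.not_eq_true] at h
      simp [pvScanA, h, ih]

-- a single-character list membership is pvAnyEnd
theorem pvContains_single (L : List String) (c : Char) :
    (L.map String.toList).contains [c] = pvAnyEnd L c := by
  induction L with
  | nil => rfl
  | cons s L ih =>
    rw [List.map_cons, List.contains_cons, ih]
    show _ = ((match s.toList with | [ch] => ch == c | _ => false) || pvAnyEnd L c)
    congr 1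
    cases hs : s.toList with
    | nil => simp
    | cons a t =>
      cases t with
      | nil => simp [BEq.comm]
      | cons a' t' => simp

-- A's Int-indexed condition at a genuine (nonnegative, in-range) index is the Nat condition
theorem pvCond_natCast (cs : List Char) (L : List String) (j : Nat) (hj : j < cs.length) :
    pvCond cs (L.map String.toList) (j : Int) = pvQ cs L j := by
  unfold pvCond pvQ pvNextOk
  have h1 : PySem.List.pyGet? cs (j : Int) = cs[j]? := PySem.List.pyGet?_natCast cs j
  congr 1
  · rw [h1, List.getElem?_eq_getElem hj]
    simp only [Option.getD_some]
    rw [List.getD_eq_getElem cs ' ' hj, ← pvContains_single L cs[j]]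
  · by_cases hn : j + 1 = cs.length
    · have hd : decide ((cs.length : Int) ≤ (j : Int) + 1) = true := by simp; omega
      rw [hd]
      simp [hn]
    · have hlt : j + 1 < cs.length := by omega
      have h2 : PySem.List.pyGet? cs ((j : Int) + 1) = cs[j + 1]? := by
        have := PySem.List.pyGet?_natCast cs (j + 1)
        rwa [Nat.cast_add, Nat.cast_one] at this
      have hd : decide ((cs.length : Int) ≤ (j : Int) + 1) = false := by simp; omega
      rw [hd, h2, List.getElem?_eq_getElem hlt, List.getD_eq_getElem cs ' ' hlt]
      simp [hn]

-- no qualifying nonnegative index means A's condition also fails at every wrapped negative index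
theorem pvCond_neg_false (cs : List Char) (L : List String) (i : Int)
    (hi0 : i < 0) (hin : -(cs.length : Int) ≤ i)
    (hnone : ∀ j : Nat, j < cs.length → pvQ cs L j = false) :
    pvCond cs (L.map String.toList) i = false := by
  have hn1 : 1 ≤ cs.length := by omega
  have hjlt : cs.length - (-i).toNat < cs.length := by omega
  have h1 : PySem.List.pyGet? cs i = cs[cs.length - (-i).toNat]? :=
    PySem.List.pyGet?_neg cs hi0 hin
  set j : Nat := cs.length - (-i).toNat with hjdef
  have hq := hnone j hjlt
  unfold pvQ pvNextOk at hq
  unfold pvCond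
  rw [h1, List.getElem?_eq_getElem hjlt]
  simp only [Option.getD_some]
  rw [← List.getD_eq_getElem cs ' ' hjlt]
  rw [pvContains_single L (cs.getD j ' ')]
  by_cases hone : i = -1
  · -- wrapped last index: the real condition at len-1 holds with its first disjunct true
    have hjval : j = cs.length - 1 := by omega
    have : (j + 1 == cs.length) = true := by simp; omega
    rw [this] at hq
    simp only [Bool.true_or, Bool.and_true] at hq
    rw [hq, Bool.false_and]
  · -- i ≤ -2: the wrapped next character is the real next character at j+1 < len
    have hi2 : i ≤ -2 := by omega
    have hd : decide ((cs.length : Int) ≤ i + 1) = false := by simp; omega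
    have hjlt1 : j + 1 < cs.length := by omega
    have h2 : PySem.List.pyGet? cs (i + 1) = cs[j + 1]? := by
      have := PySem.List.pyGet?_neg cs (i := i + 1) (by omega) (by omega)
      rw [this]
      congr 1
      omega
    rw [hd, h2, List.getElem?_eq_getElem hjlt1]
    simp only [Option.getD_some, Bool.false_or]
    rw [← List.getD_eq_getElem cs ' ' hjlt1]
    have hne : (j + 1 == cs.length) = false := by simp; omega
    rw [hne, Bool.false_or] at hq
    exact hq

-- the bridge for the nonnegative part: A's find? over the reversed Int range is B's over pvDescR
theorem pvBridge (cs : List Char) (L : List String) (lo : Nat) :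
    ((PySem.List.pyRange (lo : Int) (cs.length : Int) 1).reverse.find?
        (pvCond cs (L.map String.toList)))
      = ((pvDescR lo cs.length).find? (pvQ cs L)).map (fun (j : Nat) => (j : Int)) := by
  rw [← pvDescR_map_cast, List.find?_map]
  congr 1
  apply pvFind?_congr
  intro j hj
  have := (pvMem_descR lo cs.length j).1 hj
  exact pvCond_natCast cs L j this.2

theorem find_sentence_split_eq_alt (text : String) (sentence_endings : List String) (min_split : Int)
    (hpre : -(text.toList.length : Int) ≤ min_split) :
    find_sentence_split text sentence_endings min_split
      = find_sentence_split_alt text sentence_endings min_split := by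
  unfold find_sentence_split find_sentence_split_alt
  simp only []
  by_cases hg : ((text.toList.length : Int) < min_split)
  · rw [if_pos hg, if_pos hg]
  · rw [if_neg hg, if_neg hg]
    rw [pvScanA_eq_find?, PySem.List.pyRange_neg_one_eq_reverse]
    have hr : min_split - 1 + 1 = min_split := by ring
    have hr2 : (text.toList.length : Int) - 1 + 1 = (text.toList.length : Int) := by ring
    rw [hr, hr2]
    rw [pvFoldl_endings text.toList ((max min_split 0).toNat) text.toList.length sentence_endings 0 le_rfl]
    rw [max_eq_right (pvOut_nonneg _)]
    by_cases hm : 0 ≤ min_split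
    · -- lo = min_split
      have hcast : min_split = (((max min_split 0).toNat : Nat) : Int) := by omega
      conv_lhs => rw [hcast]
      rw [pvBridge]
      cases hf : ((pvDescR (max min_split 0).toNat text.toList.length).find?
          (pvQ text.toList sentence_endings)) <;> simp [pvOut]
    · -- negative min_split: the range splits at 0 and the negative half never matches
      have hlo0 : (max min_split 0).toNat = 0 := by omega
      rw [PySem.List.pyRange_one_append min_split 0 (text.toList.length : Int) (by omega) (by omega)]
      rw [List.reverse_append, List.find?_append, hlo0]
      have hb := pvBridge text.toList sentence_endings 0
      simp only [Nat.cast_zero] at hb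
      rw [hb]
      cases hf : ((pvDescR 0 text.toList.length).find? (pvQ text.toList sentence_endings)) with
      | some j => simp [pvOut]
      | none =>
        have hnone : ∀ j : Nat, j < text.toList.length → pvQ text.toList sentence_endings j = false := by
          intro j hjn
          have := List.find?_eq_none.1 hf j ((pvMem_descR 0 text.toList.length j).2 ⟨Nat.zero_le j, hjn⟩)
          simpa using this
        have h2 : (PySem.List.pyRange min_split 0 1).reverse.find?
            (pvCond text.toList (sentence_endings.map String.toList)) = none := by
          rw [List.find?_eq_none]
          intro i hi
          rw [List.mem_reverse, PySem.List.mem_pyRange_one] at hi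
          rw [pvCond_neg_false text.toList sentence_endings i hi.2 (by omega) hnone]
          simp
        rw [h2]
        rfl

-- ===== VERDICT (by name: the statement is the Claim_ definition above) =====
theorem find_sentence_split_spec : Claim_equal_find_sentence_split := by
  intro text sentence_endings min_split _ hpre
  unfold Spec_find_sentence_split
  exact find_sentence_split_eq_alt text sentence_endings min_split hpre
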